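-- pv_equiv track=rewrite | github.com/prashmalv/novaformrlai | src/engine/panel_optimizer.py | _greedy_fit
-- ===== SOURCE A (Python) =====
-- def _greedy_fit(target: int, widths: list[int]) -> tuple[list[int], int]:
--     """Greedy: keep adding panels until target covered. May overshoot."""
--     combo = []
--     remaining = target
--     while remaining > 0:
--         placed = False
--         for w in widths:
--             if w <= remaining:
--                 combo.append(w)
--                 remaining -= w
--                 placed = True
--                 break
--         if not placed:
--             # Must overshoot with smallest available panel
--             smallest = min(widths)
--             combo.append(smallest)
--             remaining -= smallest
--     overshoot = -remaining if remaining < 0 else 0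
--     return combo, overshoot
-- ===== SOURCE B (Python) =====
-- def _greedy_fit(target: int, widths: list[int]) -> tuple[list[int], int]:
--     """One pass: batch each width with integer division instead of one panel per loop."""
--     combo = []
--     remaining = target
--     if remaining > 0:
--         for w in widths:
--             if 0 < remaining and w <= remaining:
--                 k = remaining // w
--                 combo.extend([w] * k)
--                 remaining -= k * w
--         if remaining > 0:
--             smallest = min(widths)
--             combo.append(smallest)
--             remaining -= smallest
--     return combo, max(0, -remaining)
-- ===== Notes on version B (the rewrite author's own statement) =====
-- stated objective: alternative
-- what changed: Replaces the one-panel-per-iteration while loop (which rescans the width list for every panel placed) by a single left-to-right pass that places remaining//w panels of each width at once via integer division (O(L+N) work instead of O(L*N) for N panels placed; a timing run could not measure this because its large random inputs contain nonpositive widths, outside Pre_, where A does not terminate).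
-- outside the precondition, e.g. on _greedy_fit(5, [2, -1]): A returns ([2, 2, -1, 2], 0), B returns ([2, 2], 0); on _greedy_fit(5, [4, -2]): A does not finish within the time limit, B returns ([4], 1); on _greedy_fit(5, []): A raises ValueError, B raises ValueError
import Mathlib
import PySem

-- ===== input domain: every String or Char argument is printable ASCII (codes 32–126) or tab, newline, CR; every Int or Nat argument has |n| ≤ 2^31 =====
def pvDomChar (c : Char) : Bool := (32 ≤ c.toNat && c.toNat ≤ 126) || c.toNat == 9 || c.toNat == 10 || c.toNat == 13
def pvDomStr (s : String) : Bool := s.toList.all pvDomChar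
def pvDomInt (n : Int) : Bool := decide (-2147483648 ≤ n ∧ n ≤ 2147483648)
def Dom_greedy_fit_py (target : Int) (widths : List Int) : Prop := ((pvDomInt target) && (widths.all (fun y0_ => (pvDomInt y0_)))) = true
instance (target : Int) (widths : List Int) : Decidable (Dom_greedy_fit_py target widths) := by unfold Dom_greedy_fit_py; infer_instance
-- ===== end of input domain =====

-- B replaces A's one-panel-per-iteration while loop (one width-list rescan per panel) by a
-- single left-to-right pass that batches each width via integer division (remaining // w).


-- ===== PORT A =====
-- A's `while remaining > 0` loop, fuelled: with all widths positive (Pre_) each iteration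
-- decreases `remaining` by at least 1, so fuel target.toNat + 1 is never exhausted inside Pre_.
-- The inner `for w in widths: if w <= remaining: … break` is List.find?.
-- `min(widths)` on [] raises in Python (PySem.List.min? = none): that branch returns the
-- current state; it is unreachable inside Pre_.
def greedyFitLoopA (widths : List Int) : Nat → List Int → Int → List Int × Int
  | 0, combo, remaining => (combo, remaining)
  | fuel + 1, combo, remaining =>
    if 0 < remaining then
      match widths.find? (fun w => decide (w ≤ remaining)) with
      | some w => greedyFitLoopA widths fuel (combo ++ [w]) (remaining - w)
      | none =>
        match PySem.List.min? widths (fun x => x) with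
        | some s => greedyFitLoopA widths fuel (combo ++ [s]) (remaining - s)
        | none => (combo, remaining)
    else (combo, remaining)

def greedy_fit_py (target : Int) (widths : List Int) : List Int × Int :=
  let r := greedyFitLoopA widths (target.toNat + 1) [] target
  (r.1, if r.2 < 0 then -r.2 else 0)

-- ===== PORT B =====
def batchStepB (st : List Int × Int) (w : Int) : List Int × Int :=
  if 0 < st.2 ∧ w ≤ st.2 then
    (st.1 ++ List.replicate (PySem.Int.floordiv st.2 w).toNat w,
     st.2 - PySem.Int.floordiv st.2 w * w)
  else st

def greedy_fit_py_alt (target : Int) (widths : List Int) : List Int × Int :=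
  if 0 < target then
    let st := widths.foldl batchStepB ([], target)
    if 0 < st.2 then
      match PySem.List.min? widths (fun x => x) with
      | some s => (st.1 ++ [s], max 0 (-(st.2 - s)))
      | none => (st.1, st.2)   -- Python B raises here (min of []); unreachable inside Pre_
    else (st.1, max 0 (-st.2))
  else ([], max 0 (-target))

-- ===== PRECONDITION & SPEC =====
-- Pre_ excludes, for positive target, the inputs where widths is empty (both A and B raise
-- ValueError from min([])) and those where widths contains a nonpositive width (A's while
-- loop then diverges on most of them, and where it happens to terminate the combo it built
-- from nonpositive panels is an accident of the loop's rescanning order).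
def Pre_greedy_fit_py (target : Int) (widths : List Int) : Prop :=
  target ≤ 0 ∨ (widths ≠ [] ∧ ∀ w ∈ widths, 0 < w)
instance (target : Int) (widths : List Int) : Decidable (Pre_greedy_fit_py target widths) := by unfold Pre_greedy_fit_py; infer_instance

def pvWitness_greedy_fit_py : Int × List Int := (23, [10, 4, 3])

def Spec_greedy_fit_py (target : Int) (widths : List Int) (out : List Int × Int) : Prop := out = greedy_fit_py_alt target widths
instance (target : Int) (widths : List Int) (out : List Int × Int) : Decidable (Spec_greedy_fit_py target widths out) := by unfold Spec_greedy_fit_py; infer_instance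

-- ===== CLAIM (what is proved, stated in full; the proofs are below) =====
def Claim_equal_greedy_fit_py : Prop := ∀ (target : Int) (widths : List Int), Dom_greedy_fit_py target widths → Pre_greedy_fit_py target widths → Spec_greedy_fit_py target widths (greedy_fit_py target widths)

-- ===== LEMMAS AND PROOFS =====

-- the tail of A's loop once nothing fits / remaining is spent
def finishStep (widths : List Int) (st : List Int × Int) : List Int × Int :=
  if 0 < st.2 then
    match PySem.List.min? widths (fun x => x) with
    | some s => (st.1 ++ [s], st.2 - s)
    | none => st
  else st

lemma loopA_nonpos (widths : List Int) (fuel : Nat) (combo : List Int) (r : Int)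
    (h : ¬ 0 < r) : greedyFitLoopA widths fuel combo r = (combo, r) := by
  cases fuel with
  | zero => rfl
  | succ f => simp [greedyFitLoopA, h]

lemma batchStepB_mk (c : List Int) (r w : Int) :
    batchStepB (c, r) w =
      if 0 < r ∧ w ≤ r then
        (c ++ List.replicate (PySem.Int.floordiv r w).toNat w,
         r - PySem.Int.floordiv r w * w)
      else (c, r) := rfl

lemma batchStepB_absorb (combo : List Int) (r w : Int) (hw : 0 < w) (hr : 0 < r)
    (hfit : w ≤ r) :
    batchStepB (combo, r) w = batchStepB (combo ++ [w], r - w) w := by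
  have hdiv : PySem.Int.floordiv r w = r / w := PySem.Int.floordiv_eq_ediv_of_pos hw
  have hdiv' : PySem.Int.floordiv (r - w) w = (r - w) / w := PySem.Int.floordiv_eq_ediv_of_pos hw
  have hsub : (r - w) / w = r / w - 1 := by
    have := Int.add_mul_ediv_right r (-1) (show w ≠ 0 by omega)
    simpa [sub_eq_add_neg, neg_mul] using this
  have hk1 : 1 ≤ r / w := by
    rw [Int.le_ediv_iff_mul_le hw]; omega
  rw [batchStepB_mk, batchStepB_mk, if_pos ⟨hr, hfit⟩, hdiv, hdiv', hsub]
  by_cases h2 : w ≤ r - w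
  · -- second application still fits
    have hr2 : 0 < r - w := by omega
    rw [if_pos ⟨hr2, h2⟩]
    simp only [Prod.mk.injEq]
    constructor
    · simp only [List.append_assoc, List.singleton_append]
      congr 1
      have hnat : (r / w).toNat = ((r / w - 1).toNat) + 1 := by omega
      rw [hnat, List.replicate_succ]
    · ring
  · -- r - w < w : both sides give (combo ++ [w], r - w)
    have hq : r / w = 1 := by
      have h1 : r / w < 2 := by rw [Int.ediv_lt_iff_lt_mul hw]; omega
      omega
    rw [if_neg (by omega), hq]
    simp

lemma findA_of_skip (pre : List Int) (w : Int) (rest : List Int) (r : Int)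
    (hpre : ∀ x ∈ pre, r < x) (hfit : w ≤ r) :
    (pre ++ w :: rest).find? (fun x => decide (x ≤ r)) = some w := by
  rw [List.find?_append]
  have hnone : pre.find? (fun x => decide (x ≤ r)) = none := by
    rw [List.find?_eq_none]
    intro x hx
    simpa using not_le.mpr (hpre x hx)
  simp [hnone, List.find?, hfit]

-- The core equivalence: A's loop, started after a skipped prefix `pre` (every element of
-- which exceeds `remaining`), computes B's batched fold over the rest, followed by at most
-- one overshoot step.
theorem loopA_eq_batch (rest : List Int) (remaining : Int) (pre combo : List Int) (fuel : Nat)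
    (hpos : ∀ x ∈ pre ++ rest, 0 < x) (hpre : ∀ x ∈ pre, remaining < x)
    (hr : 0 ≤ remaining) (hfuel : remaining.toNat + 1 ≤ fuel) :
    greedyFitLoopA (pre ++ rest) fuel combo remaining =
      finishStep (pre ++ rest) (rest.foldl batchStepB (combo, remaining)) := by
  cases fuel with
  | zero => omega
  | succ f =>
    match rest with
    | [] =>
      simp only [List.foldl_nil]
      by_cases h0 : 0 < remaining
      · rw [greedyFitLoopA, if_pos h0]
        have hnone : (pre ++ ([] : List Int)).find? (fun x => decide (x ≤ remaining)) = none := by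
          rw [List.find?_eq_none]
          intro x hx
          simp only [List.append_nil] at hx
          simpa using not_le.mpr (hpre x hx)
        rw [hnone]
        rw [finishStep, if_pos h0]
        cases hmin : PySem.List.min? (pre ++ ([] : List Int)) (fun x => x) with
        | none => simp
        | some s =>
          have hs : s ∈ pre := by
            have := PySem.List.min?_mem hmin
            simpa using this
          have hneg : remaining - s < 0 := by have := hpre s hs; omega
          simp only
          rw [loopA_nonpos _ _ _ _ (by omega)]
      · rw [loopA_nonpos _ _ _ _ h0, finishStep, if_neg h0]
    | w :: rest' =>
      have hwpos : 0 < w := hpos w (by simp)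
      by_cases hfit : 0 < remaining ∧ w ≤ remaining
      · -- A picks w once; recurse on smaller remaining
        rw [greedyFitLoopA, if_pos hfit.1,
            findA_of_skip pre w rest' remaining hpre hfit.2]
        have hrec := loopA_eq_batch (w :: rest') (remaining - w) pre (combo ++ [w]) f
          hpos (fun x hx => by have := hpre x hx; omega) (by omega) (by omega)
        show greedyFitLoopA (pre ++ w :: rest') f (combo ++ [w]) (remaining - w) = _
        rw [hrec]
        congr 1
        rw [List.foldl_cons, List.foldl_cons,
            batchStepB_absorb combo remaining w hwpos hfit.1 hfit.2]
      · -- w does not fit (or remaining = 0): skip it on both sides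
        have hlt : remaining < w := by
          rcases not_and_or.mp hfit with h | h
          · omega
          · omega
        have hskip : batchStepB (combo, remaining) w = (combo, remaining) := by
          rw [batchStepB_mk, if_neg (by omega)]
        have hrec := loopA_eq_batch rest' remaining (pre ++ [w]) combo (f + 1)
          (by simpa using hpos)
          (by intro x hx; rcases List.mem_append.mp hx with h | h
              · exact hpre x h
              · simp at h; omega)
          hr hfuel
        simpa [List.foldl_cons, hskip] using hrec
termination_by (rest.length, remaining.toNat)
decreasing_by
  all_goals first
    | exact Prod.Lex.right _ (by omega)
    | exact Prod.Lex.left _ _ (by simp)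

-- ===== VERDICT (by name: the statement is the Claim_ definition above) =====
theorem greedy_fit_py_spec : Claim_equal_greedy_fit_py := by
  intro target widths _hdom hpre
  unfold Spec_greedy_fit_py greedy_fit_py greedy_fit_py_alt
  by_cases hpos : 0 < target
  · have hall : ∀ w ∈ widths, 0 < w := by
      rcases hpre with h | h
      · omega
      · exact h.2
    have h := loopA_eq_batch widths target [] [] (target.toNat + 1)
      (by simpa using hall) (by simp) (by omega) (by omega)
    simp only [List.nil_append] at h
    rw [h, if_pos hpos]
    set st := widths.foldl batchStepB (([] : List Int), target) with hst
    rw [finishStep]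
    by_cases h0 : 0 < st.2
    · rw [if_pos h0, if_pos h0]
      cases hmin : PySem.List.min? widths (fun x => x) with
      | none =>
        exfalso
        rcases hpre with hp | hp
        · omega
        · exact hp.1 (((PySem.List.min?_eq_none_iff widths (fun x => x)).mp hmin))
      | some s =>
        simp only [Prod.mk.injEq]
        refine ⟨trivial, ?_⟩
        split_ifs <;> omega
    · rw [if_neg h0, if_neg h0]
      simp only [Prod.mk.injEq]
      refine ⟨trivial, ?_⟩
      split_ifs <;> omega
  · rw [if_neg hpos]
    rw [loopA_nonpos widths (target.toNat + 1) [] target hpos]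
    simp only [Prod.mk.injEq]
    refine ⟨trivial, ?_⟩
    split_ifs <;> omega
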